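-- pv_equiv track=rewrite | github.com/ThobiasKH/GeographyXPAlgorithm | ueg_tree_partition_xp_only.py | _possible_multiplicity_vectors
-- ===== SOURCE A (Python) =====
-- from typing import Dict, FrozenSet, Iterable, List, Optional, Sequence, Set, Tuple
--
-- def tuple_counter_add(vec: Tuple[int, ...], idx: int, delta: int) -> Tuple[int, ...]:
--     """Return ``vec`` with ``delta`` added at coordinate ``idx``."""
--     lst = list(vec)
--     lst[idx] += delta
--     if lst[idx] < 0:
--         raise ValueError("negative multiplicity")
--     return tuple(lst)
--
-- def _possible_multiplicity_vectors(
--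
--     child_type_options: List[Set[int]],
--     local_type_index: Dict[int, int],
-- ) -> Set[Tuple[int, ...]]:
--     """
--     Enumerate multiplicity vectors realizable by choosing one realizable type per child.
--     """
--     zero = tuple(0 for _ in range(len(local_type_index)))
--     vectors: Set[Tuple[int, ...]] = {zero}
--     for options in child_type_options:
--         new_vectors: Set[Tuple[int, ...]] = set()
--         for vec in vectors:
--             for tid in options:
--                 if tid not in local_type_index:
--                     continue
--                 idx = local_type_index[tid]
--                 new_vectors.add(tuple_counter_add(vec, idx, 1))
--         vectors = new_vectors
--     if not child_type_options:
--         return {zero}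
--     return vectors
-- ===== SOURCE B (Python) =====
-- def _product(lists):
--     if not lists:
--         return [[]]
--     rest = _product(lists[1:])
--     return [[x] + c for x in lists[0] for c in rest]
--
-- def _possible_multiplicity_vectors(child_type_options, local_type_index):
--     n = len(local_type_index)
--     filtered = [[local_type_index[tid] for tid in opts if tid in local_type_index]
--                 for opts in child_type_options]
--     result = set()
--     for combo in _product(filtered):
--         vec = [0] * n
--         for idx in combo:
--             vec[idx] += 1
--         result.add(tuple(vec))
--     return result
-- ===== Notes on version B (the rewrite author's own statement) =====
-- stated objective: alternative
-- what changed: Replaces A's layer-by-layer DP that rebuilds a deduplicated set of partial vectors after every child with a single Cartesian-product enumeration over pre-filtered per-child index lists, building each multiplicity vector in one pass and deduplicating only once in the final result set.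
import Mathlib
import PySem

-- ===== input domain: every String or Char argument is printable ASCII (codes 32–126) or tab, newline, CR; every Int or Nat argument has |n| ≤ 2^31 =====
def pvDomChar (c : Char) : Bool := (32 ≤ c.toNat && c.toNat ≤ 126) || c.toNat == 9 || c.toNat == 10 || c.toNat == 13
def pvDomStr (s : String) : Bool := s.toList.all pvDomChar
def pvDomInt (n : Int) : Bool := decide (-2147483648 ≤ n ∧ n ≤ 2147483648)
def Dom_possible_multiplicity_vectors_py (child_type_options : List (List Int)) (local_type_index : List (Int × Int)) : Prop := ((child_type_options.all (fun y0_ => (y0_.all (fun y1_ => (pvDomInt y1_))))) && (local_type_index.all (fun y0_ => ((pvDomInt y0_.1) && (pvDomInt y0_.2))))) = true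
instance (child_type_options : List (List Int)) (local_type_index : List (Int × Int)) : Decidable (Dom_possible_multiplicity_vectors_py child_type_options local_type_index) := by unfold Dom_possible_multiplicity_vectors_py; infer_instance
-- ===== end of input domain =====

-- B replaces A's layer-by-layer deduplicating DP with a direct Cartesian-product enumeration
-- over the pre-filtered per-child index lists (objective: simpler/alternative; not faster).

-- ===== PORT A =====
-- tuple_counter_add vec idx delta = Python's tuple_counter_add; the "negative multiplicity"
-- ValueError branch is unreachable for A's only call pattern (delta = 1 on entries ≥ 0), so it
-- is ported total; the IndexError of lst[idx] (idx out of [-n, n)) is excluded by Pre_ below.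
def tuple_counter_add (vec : List Int) (idx : Int) (delta : Int) : List Int :=
  PySem.List.pySetD vec idx (PySem.List.pyGetD vec idx 0 + delta)

def possible_multiplicity_vectors_py (child_type_options : List (List Int)) (local_type_index : List (Int × Int)) : List (List Int) :=
  let zero : List Int := List.replicate local_type_index.length (0 : Int)
  let vectors : PySem.Set (List Int) :=
    child_type_options.foldl
      (fun vectors options =>
        vectors.foldl
          (fun new_vectors vec =>
            options.foldl
              (fun new_vectors tid =>
                match (PySem.Dict.mk local_type_index).get? tid with
                | none => new_vectors
                | some idx => PySem.Set.add new_vectors (tuple_counter_add vec idx 1))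
              new_vectors)
          PySem.Set.empty)
      (PySem.Set.add PySem.Set.empty zero)
  if child_type_options.isEmpty then PySem.Set.add PySem.Set.empty zero else vectors

-- ===== PORT B =====
-- pv_product = Source B's _product (itertools.product order: first list most significant)
def pv_product (lists : List (List Int)) : List (List Int) :=
  match lists with
  | [] => [[]]
  | l :: ls => l.flatMap (fun x => (pv_product ls).map (fun c => x :: c))

def possible_multiplicity_vectors_py_alt (child_type_options : List (List Int)) (local_type_index : List (Int × Int)) : List (List Int) :=
  let n := local_type_index.length
  let filtered : List (List Int) :=
    child_type_options.map (fun opts =>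
      opts.filterMap (fun tid => (PySem.Dict.mk local_type_index).get? tid))
  (pv_product filtered).foldl
    (fun result combo =>
      PySem.Set.add result
        (combo.foldl
          (fun vec idx => PySem.List.pySetD vec idx (PySem.List.pyGetD vec idx 0 + 1))
          (List.replicate n (0 : Int))))
    PySem.Set.empty

-- ===== PRECONDITION & SPEC =====
-- Pre_ excludes exactly the inputs where Python A raises IndexError: some child i whose options
-- contain a type id mapped to an index outside [-n, n), while every earlier child has at least one
-- mapped type id (otherwise the pool of partial vectors is already empty and A returns without
-- ever touching the bad index).
def Pre_possible_multiplicity_vectors_py (child_type_options : List (List Int)) (local_type_index : List (Int × Int)) : Prop :=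
  ∀ i : Fin child_type_options.length,
    (∀ j : Fin child_type_options.length, j.1 < i.1 →
      ∃ tid ∈ child_type_options[j], ((PySem.Dict.mk local_type_index).get? tid).isSome) →
    ∀ tid ∈ child_type_options[i], ∀ idx ∈ (PySem.Dict.mk local_type_index).get? tid,
      PySem.Raise.InRange local_type_index.length idx
instance (child_type_options : List (List Int)) (local_type_index : List (Int × Int)) : Decidable (Pre_possible_multiplicity_vectors_py child_type_options local_type_index) := by unfold Pre_possible_multiplicity_vectors_py; infer_instance

def pvWitness_possible_multiplicity_vectors_py : List (List Int) × (List (Int × Int)) :=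
  ([[1, 2], [2]], [(1, 0), (2, 1)])

def Spec_possible_multiplicity_vectors_py (child_type_options : List (List Int)) (local_type_index : List (Int × Int)) (out : List (List Int)) : Prop := out = possible_multiplicity_vectors_py_alt child_type_options local_type_index
instance (child_type_options : List (List Int)) (local_type_index : List (Int × Int)) (out : List (List Int)) : Decidable (Spec_possible_multiplicity_vectors_py child_type_options local_type_index out) := by unfold Spec_possible_multiplicity_vectors_py; infer_instance

-- ===== CLAIM (what is proved, stated in full; the proofs are below) =====
def Claim_equal_possible_multiplicity_vectors_py : Prop := ∀ (child_type_options : List (List Int)) (local_type_index : List (Int × Int)), Dom_possible_multiplicity_vectors_py child_type_options local_type_index → Pre_possible_multiplicity_vectors_py child_type_options local_type_index → Spec_possible_multiplicity_vectors_py child_type_options local_type_index (possible_multiplicity_vectors_py child_type_options local_type_index)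

-- ===== LEMMAS AND PROOFS =====

-- the one-coordinate bump both programs perform
def pvBump (vec : List Int) (idx : Int) : List Int :=
  PySem.List.pySetD vec idx (PySem.List.pyGetD vec idx 0 + 1)

-- the realizable index list of one child
def pvFidx (lti : List (Int × Int)) (opts : List Int) : List Int :=
  opts.filterMap (fun tid => (PySem.Dict.mk lti).get? tid)

-- one layer of A's DP
def pvLayer (lti : List (Int × Int)) (vectors : PySem.Set (List Int)) (options : List Int) : PySem.Set (List Int) :=
  vectors.foldl
    (fun new_vectors vec =>
      options.foldl
        (fun new_vectors tid =>
          match (PySem.Dict.mk lti).get? tid with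
          | none => new_vectors
          | some idx => PySem.Set.add new_vectors (tuple_counter_add vec idx 1))
        new_vectors)
    PySem.Set.empty

theorem pv_update_of_subset {α : Type} [BEq α] [LawfulBEq α] (s : PySem.Set α) (X : List α)
    (h : ∀ b ∈ X, b ∈ s) : PySem.Set.update s X = s := by
  induction X generalizing s with
  | nil => rfl
  | cons x X ih =>
    rw [PySem.Set.update_cons, PySem.Set.add_of_mem (h x (by simp))]
    exact ih s (fun b hb => h b (by simp [hb]))

theorem pv_inner_eq (lti : List (Int × Int)) (opts : List Int) (vec : List Int)
    (nv : PySem.Set (List Int)) :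
    opts.foldl
      (fun new_vectors tid =>
        match (PySem.Dict.mk lti).get? tid with
        | none => new_vectors
        | some idx => PySem.Set.add new_vectors (tuple_counter_add vec idx 1))
      nv
    = PySem.Set.update nv ((pvFidx lti opts).map (pvBump vec)) := by
  induction opts generalizing nv with
  | nil => rfl
  | cons t opts ih =>
    simp only [List.foldl_cons, pvFidx, List.filterMap_cons]
    cases h : (PySem.Dict.mk lti).get? t with
    | none => simpa [pvFidx] using ih nv
    | some idx =>
      simp only [List.map_cons, PySem.Set.update_cons]
      have : tuple_counter_add vec idx 1 = pvBump vec idx := rfl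
      rw [this]
      simpa [pvFidx] using ih (PySem.Set.add nv (pvBump vec idx))

theorem pv_foldl_update {α β : Type} [BEq β] [LawfulBEq β] (g : α → List β) (V : List α)
    (s : PySem.Set β) :
    V.foldl (fun nv v => PySem.Set.update nv (g v)) s = PySem.Set.update s (V.flatMap g) := by
  induction V generalizing s with
  | nil => rfl
  | cons v V ih => simp [List.foldl_cons, ih, PySem.Set.update_append]

theorem pv_layer_eq (lti : List (Int × Int)) (V : PySem.Set (List Int)) (opts : List Int) :
    pvLayer lti V opts
    = PySem.Set.update PySem.Set.empty (V.flatMap (fun v => (pvFidx lti opts).map (pvBump v))) := by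
  unfold pvLayer
  rw [show (fun (new_vectors : PySem.Set (List Int)) (vec : List Int) =>
        opts.foldl
          (fun new_vectors tid =>
            match (PySem.Dict.mk lti).get? tid with
            | none => new_vectors
            | some idx => PySem.Set.add new_vectors (tuple_counter_add vec idx 1))
          new_vectors)
      = (fun nv vec => PySem.Set.update nv ((pvFidx lti opts).map (pvBump vec)))
    from funext fun nv => funext fun vec => pv_inner_eq lti opts vec nv]
  exact pv_foldl_update _ V PySem.Set.empty

-- dedup of the input list does not change the deduplicated flatMap image
theorem pv_key {α β : Type} [BEq α] [LawfulBEq α] [BEq β] [LawfulBEq β] (g : α → List β)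
    (L : List α) (t : PySem.Set α) (s : PySem.Set β)
    (h : ∀ a ∈ t, ∀ b ∈ g a, b ∈ s) :
    PySem.Set.update s ((PySem.Set.update t L).flatMap g)
    = PySem.Set.update (PySem.Set.update s (t.flatMap g)) (L.flatMap g) := by
  induction L generalizing t s with
  | nil => rfl
  | cons x L ih =>
    have habs : PySem.Set.update s (t.flatMap g) = s :=
      pv_update_of_subset s _ (by
        intro b hb
        obtain ⟨a, ha, hb⟩ := List.mem_flatMap.mp hb
        exact h a ha b hb)
    by_cases hx : x ∈ t
    · rw [PySem.Set.update_cons, PySem.Set.add_of_mem hx, ih t s h]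
      simp only [List.flatMap_cons, PySem.Set.update_append, habs]
      rw [pv_update_of_subset s (g x) (fun b hb => h x hx b hb)]
    · rw [PySem.Set.update_cons, PySem.Set.add_of_not_mem hx]
      have h' : ∀ a ∈ t ++ [x], ∀ b ∈ g a, b ∈ PySem.Set.update s (g x) := by
        intro a ha b hb
        rcases List.mem_append.mp ha with ha | ha
        · exact (PySem.Set.mem_update _ _ _).mpr (Or.inl (h a ha b hb))
        · simp only [List.mem_singleton] at ha
          subst ha
          exact (PySem.Set.mem_update _ _ _).mpr (Or.inr hb)
      have hsplit := PySem.Set.update_eq_append_filter (t ++ [x]) L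
      have habs2 : ∀ (u : PySem.Set β), (∀ b ∈ (t ++ [x]).flatMap g, b ∈ u) →
          PySem.Set.update u ((t ++ [x]).flatMap g) = u := fun u hu => pv_update_of_subset u _ hu
      have hsub : ∀ b ∈ (t ++ [x]).flatMap g, b ∈ PySem.Set.update s (g x) := by
        intro b hb
        obtain ⟨a, ha, hb⟩ := List.mem_flatMap.mp hb
        exact h' a ha b hb
      calc PySem.Set.update s ((( t ++ [x]).update L).flatMap g)
          = PySem.Set.update (PySem.Set.update s ((t ++ [x]).flatMap g))
              ((((PySem.Set.ofList L).filter (fun y => !(PySem.Set.contains (t ++ [x]) y))).flatMap g)) := by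
            rw [hsplit, List.flatMap_append, PySem.Set.update_append]
        _ = PySem.Set.update (PySem.Set.update s (g x))
              ((((PySem.Set.ofList L).filter (fun y => !(PySem.Set.contains (t ++ [x]) y))).flatMap g)) := by
            rw [List.flatMap_append, PySem.Set.update_append, habs]
            simp only [List.flatMap_cons, List.flatMap_nil, List.append_nil]
        _ = PySem.Set.update (PySem.Set.update s (g x)) (((t ++ [x]).update L).flatMap g) := by
            rw [hsplit, List.flatMap_append, PySem.Set.update_append, habs2 _ hsub]
        _ = PySem.Set.update (PySem.Set.update (PySem.Set.update s (g x)) ((t ++ [x]).flatMap g))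
              (L.flatMap g) := ih (t ++ [x]) (PySem.Set.update s (g x)) h'
        _ = PySem.Set.update (PySem.Set.update s (g x)) (L.flatMap g) := by rw [habs2 _ hsub]
        _ = PySem.Set.update (PySem.Set.update s (t.flatMap g)) ((x :: L).flatMap g) := by
            rw [habs, List.flatMap_cons, PySem.Set.update_append]

-- main invariant: A's DP from any deduplicated pool equals the deduplicated product image
theorem pv_main (lti : List (Int × Int)) (cto : List (List Int)) (L : List (List Int)) :
    cto.foldl (pvLayer lti) (PySem.Set.ofList L)
    = PySem.Set.ofList
        (L.flatMap (fun v => (pv_product (cto.map (pvFidx lti))).map (fun c => c.foldl pvBump v))) := by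
  induction cto generalizing L with
  | nil => simp [pv_product]
  | cons o cto ih =>
    rw [List.foldl_cons, pv_layer_eq]
    have key0 : PySem.Set.update PySem.Set.empty
          ((PySem.Set.ofList L).flatMap (fun v => (pvFidx lti o).map (pvBump v)))
        = PySem.Set.ofList (L.flatMap (fun v => (pvFidx lti o).map (pvBump v))) := by
      have := pv_key (fun v => (pvFidx lti o).map (pvBump v)) L PySem.Set.empty PySem.Set.empty
        (by intro a ha; simp [PySem.Set.empty] at ha)
      simpa [PySem.Set.ofList, PySem.Set.update] using this
    rw [key0, ih]
    congr 1
    simp only [pv_product, List.map_cons, List.flatMap_assoc, List.flatMap_map, List.map_flatMap,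
      List.map_map, Function.comp_def, List.foldl_cons]

-- folding Set.add of images = update with the mapped list (B's outer loop)
theorem pv_fold_add (combos : List (List Int)) (F : List Int → List Int) (s : PySem.Set (List Int)) :
    combos.foldl (fun r c => PySem.Set.add r (F c)) s = PySem.Set.update s (combos.map F) := by
  rw [PySem.Set.update_map_eq_foldl_add]

-- rfl bridges between the ports and the proof-side names
theorem pv_A_eq (cto : List (List Int)) (lti : List (Int × Int)) :
    possible_multiplicity_vectors_py cto lti
    = if cto.isEmpty then PySem.Set.ofList [List.replicate lti.length (0 : Int)]
      else cto.foldl (pvLayer lti) (PySem.Set.ofList [List.replicate lti.length (0 : Int)]) := rfl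

theorem pv_B_eq (cto : List (List Int)) (lti : List (Int × Int)) :
    possible_multiplicity_vectors_py_alt cto lti
    = PySem.Set.update PySem.Set.empty
        ((pv_product (cto.map (pvFidx lti))).map
          (fun c => c.foldl pvBump (List.replicate lti.length (0 : Int)))) :=
  pv_fold_add _ _ _

-- ===== VERDICT (by name: the statement is the Claim_ definition above) =====
theorem possible_multiplicity_vectors_py_spec : Claim_equal_possible_multiplicity_vectors_py := by
  intro cto lti _ _
  unfold Spec_possible_multiplicity_vectors_py
  rw [pv_A_eq, pv_B_eq]
  cases cto with
  | nil => rfl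
  | cons o cto =>
    rw [if_neg (by simp)]
    rw [pv_main lti (o :: cto) [List.replicate lti.length (0 : Int)]]
    rw [PySem.Set.update_empty]
    congr 1
    simp [List.flatMap_cons]
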